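-- pv_equiv track=rewrite | github.com/thomas-hiddenpeak/DeusRidet | tools/eval_speaker_accuracy.py | gt_to_intervals
-- ===== SOURCE A (Python) =====
-- def gt_to_intervals(entries):
--     """Convert GT entries to intervals: (start, end, speaker).
--     End time = start of next entry (or +30s for last).
--     """
--     intervals = []
--     for i, (t, spk, text) in enumerate(entries):
--         if i + 1 < len(entries):
--             end = entries[i + 1][0]
--         else:
--             end = t + 30
--         intervals.append((t, end, spk))
--     return intervals
-- ===== SOURCE B (Python) =====
-- def gt_to_intervals(entries):
--     """Convert GT entries to intervals: (start, end, speaker).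
--     End time = start of next entry (or +30s for last).
--     """
--     out = []
--     next_start = None
--     for (t, spk, _text) in reversed(entries):
--         end = t + 30 if next_start is None else next_start
--         out.append((t, end, spk))
--         next_start = t
--     out.reverse()
--     return out
-- ===== Notes on version B (the rewrite author's own statement) =====
-- stated objective: alternative
-- what changed: Replaces the index-based forward loop with entries[i+1] lookahead by a backwards pass that threads the next entry's start through an accumulator (next_start), then reverses the built list; no indexing or lookahead at all.
import Mathlib
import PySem

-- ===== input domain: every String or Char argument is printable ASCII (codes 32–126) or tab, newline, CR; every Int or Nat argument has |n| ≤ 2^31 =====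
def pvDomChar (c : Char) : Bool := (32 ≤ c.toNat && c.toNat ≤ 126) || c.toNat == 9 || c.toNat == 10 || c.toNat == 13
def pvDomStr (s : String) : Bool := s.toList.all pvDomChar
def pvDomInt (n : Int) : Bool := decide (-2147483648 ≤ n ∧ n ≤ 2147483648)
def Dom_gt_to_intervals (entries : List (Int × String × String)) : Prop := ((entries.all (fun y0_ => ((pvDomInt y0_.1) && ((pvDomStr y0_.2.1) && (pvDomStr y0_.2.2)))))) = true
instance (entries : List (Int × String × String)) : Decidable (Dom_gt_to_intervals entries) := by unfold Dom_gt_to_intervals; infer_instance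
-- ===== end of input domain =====

-- B replaces A's index-based forward loop (entries[i+1] lookahead) by a backwards pass that
-- threads the next entry's start through an accumulator, then reverses (alternative; same cost).

-- ===== PORT A =====
-- for i, (t, spk, text) in enumerate(entries): end = entries[i+1][0] if i+1 < len else t+30; append (t, end, spk)
def gt_to_intervals (entries : List (Int × String × String)) : List (Int × Int × String) :=
  (PySem.List.enumerate entries).foldl
    (fun intervals p =>
      let i := p.1
      let t := p.2.1
      let spk := p.2.2.1
      let e : Int :=
        if i + 1 < (entries.length : Int) then
          ((PySem.List.pyGet? entries (i + 1)).getD (0, "", "")).1  -- guarded: in range, getD never takes the default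
        else t + 30
      intervals ++ [(t, e, spk)]) []

-- ===== PORT B =====
-- backwards pass: for (t, spk, _) in reversed(entries): end = next_start or t+30; append; next_start = t; then reverse
def gt_to_intervals_alt (entries : List (Int × String × String)) : List (Int × Int × String) :=
  let st := entries.reverse.foldl
    (fun (st : List (Int × Int × String) × Option Int) e =>
      let t := e.1
      let spk := e.2.1
      let endv : Int := match st.2 with
        | none => t + 30
        | some ns => ns
      (st.1 ++ [(t, endv, spk)], some t)) ([], none)
  st.1.reverse

-- ===== PRECONDITION & SPEC =====
def Spec_gt_to_intervals (entries : List (Int × String × String)) (out : List (Int × Int × String)) : Prop := out = gt_to_intervals_alt entries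
instance (entries : List (Int × String × String)) (out : List (Int × Int × String)) : Decidable (Spec_gt_to_intervals entries out) := by unfold Spec_gt_to_intervals; infer_instance

-- ===== CLAIM =====
def Claim_equal_gt_to_intervals : Prop := ∀ (entries : List (Int × String × String)), Dom_gt_to_intervals entries → Spec_gt_to_intervals entries (gt_to_intervals entries)

-- ===== LEMMAS AND PROOFS =====

-- pairwise recursive characterisation shared by both proofs
def pairSpec : List (Int × String × String) → List (Int × Int × String)
  | [] => []
  | e :: l =>
    (e.1, (match l with | [] => e.1 + 30 | f :: _ => f.1), e.2.1) :: pairSpec l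

theorem length_pairSpec (l : List (Int × String × String)) :
    (pairSpec l).length = l.length := by
  induction l with
  | nil => rfl
  | cons e l ih => simp [pairSpec, ih]

theorem getElem_pairSpec (l : List (Int × String × String)) (k : Nat) (h : k < l.length)
    (h' : k < (pairSpec l).length) :
    (pairSpec l)[k]'h' =
      (l[k].1,
       if hk : k + 1 < l.length then (l[k+1]'hk).1 else l[k].1 + 30,
       l[k].2.1) := by
  induction l generalizing k with
  | nil => simp at h
  | cons e l ih =>
    cases k with
    | zero =>
      cases l with
      | nil => simp [pairSpec]
      | cons f l => simp [pairSpec]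
    | succ k =>
      have hk : k < l.length := by simpa using h
      have hk' : k < (pairSpec l).length := by rw [length_pairSpec]; exact hk
      simp only [pairSpec, List.getElem_cons_succ]
      rw [ih k hk hk']
      simp only [List.length_cons, List.getElem_cons_succ]
      by_cases hc : k + 1 < l.length
      · rw [dif_pos hc, dif_pos (by omega)]
      · rw [dif_neg hc, dif_neg (by omega)]

-- the backwards fold's state after processing l.reverse
theorem alt_fold_eq (l : List (Int × String × String)) :
    l.reverse.foldl
      (fun (st : List (Int × Int × String) × Option Int) e =>
        let t := e.1
        let spk := e.2.1
        let endv : Int := match st.2 with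
          | none => t + 30
          | some ns => ns
        (st.1 ++ [(t, endv, spk)], some t)) ([], none)
    = ((pairSpec l).reverse, match l with | [] => none | f :: _ => some f.1) := by
  induction l with
  | nil => rfl
  | cons e l ih =>
    rw [List.reverse_cons, List.foldl_append, ih]
    cases l with
    | nil => simp [pairSpec]
    | cons f l => simp [pairSpec]

theorem alt_eq_pairSpec (entries : List (Int × String × String)) :
    gt_to_intervals_alt entries = pairSpec entries := by
  unfold gt_to_intervals_alt
  rw [alt_fold_eq]
  simp

theorem gt_to_intervals_eq_map (entries : List (Int × String × String)) :
    gt_to_intervals entries =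
      (PySem.List.enumerate entries).map (fun p =>
        (p.2.1,
         if p.1 + 1 < (entries.length : Int) then
           ((PySem.List.pyGet? entries (p.1 + 1)).getD (0, "", "")).1
         else p.2.1 + 30,
         p.2.2.1)) := by
  unfold gt_to_intervals
  rw [PySem.List.foldl_append_singleton_eq_map]
  simp

theorem length_gt_to_intervals (entries : List (Int × String × String)) :
    (gt_to_intervals entries).length = entries.length := by
  rw [gt_to_intervals_eq_map]; simp

theorem a_eq_pairSpec (entries : List (Int × String × String)) :
    gt_to_intervals entries = pairSpec entries := by
  apply List.ext_getElem
  · rw [length_gt_to_intervals, length_pairSpec]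
  intro k h1 h2
  have hk : k < entries.length := by rwa [length_gt_to_intervals] at h1
  have hA : (gt_to_intervals entries)[k]'h1 =
      (entries[k].1,
       if (k : Int) + 1 < (entries.length : Int) then
         ((PySem.List.pyGet? entries ((k : Int) + 1)).getD (0, "", "")).1
       else entries[k].1 + 30,
       entries[k].2.1) := by
    rw [List.getElem_of_eq (gt_to_intervals_eq_map entries)]
    rw [List.getElem_map, PySem.List.getElem_enumerate]
    simp
  rw [hA, getElem_pairSpec entries k hk h2]
  by_cases hc : k + 1 < entries.length
  · have hcond : (k : Int) + 1 < (entries.length : Int) := by push_cast; omega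
    have hget : PySem.List.pyGet? entries ((k : Int) + 1) = some (entries[k+1]'hc) := by
      have : ((k : Int) + 1) = ((k + 1 : Nat) : Int) := by push_cast; ring
      rw [this, PySem.List.pyGet?_natCast]
      simp [List.getElem?_eq_getElem hc]
    rw [if_pos hcond, dif_pos hc, hget, Option.getD_some]
  · have hcond : ¬ ((k : Int) + 1 < (entries.length : Int)) := by push_cast; omega
    rw [if_neg hcond, dif_neg hc]

-- ===== VERDICT =====
theorem gt_to_intervals_spec : Claim_equal_gt_to_intervals := by
  intro entries _
  unfold Spec_gt_to_intervals
  rw [a_eq_pairSpec, alt_eq_pairSpec]
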